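-- pv_equiv track=rewrite | github.com/sliamh11/nanoclaw | scripts/bench/suites/context_sufficiency.py | _check_substrings
-- ===== SOURCE A (Python) =====
-- def _check_substrings(text: str, substrings: list[str], must_match: str) -> tuple[bool, list[str]]:
--     hits = [s for s in substrings if s.lower() in text.lower()]
--     if must_match == "all":
--         passed = len(hits) == len(substrings)
--     else:
--         passed = len(hits) > 0
--     misses = [s for s in substrings if s.lower() not in text.lower()]
--     return passed, misses
-- ===== SOURCE B (Python) =====
-- def _check_substrings(text: str, substrings: list[str], must_match: str) -> tuple[bool, list[str]]:
--     t = text.lower()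
--     lengths = {len(s) for s in substrings}
--     windows = set()
--     for m in lengths:
--         for i in range(len(t) - m + 1):
--             windows.add(t[i:i + m])
--     misses = [s for s in substrings if s.lower() not in windows]
--     if must_match == "all":
--         passed = not misses
--     else:
--         passed = len(misses) < len(substrings)
--     return passed, misses
-- ===== Notes on version B (the rewrite author's own statement) =====
-- stated objective: faster
-- what changed: B never searches the text per substring: it lowercases the text once, collects every window of each distinct substring length into a hash set in one scan per length, and decides each substring (and the verdict, derived from the miss list alone) by a set lookup.
import Mathlib
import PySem

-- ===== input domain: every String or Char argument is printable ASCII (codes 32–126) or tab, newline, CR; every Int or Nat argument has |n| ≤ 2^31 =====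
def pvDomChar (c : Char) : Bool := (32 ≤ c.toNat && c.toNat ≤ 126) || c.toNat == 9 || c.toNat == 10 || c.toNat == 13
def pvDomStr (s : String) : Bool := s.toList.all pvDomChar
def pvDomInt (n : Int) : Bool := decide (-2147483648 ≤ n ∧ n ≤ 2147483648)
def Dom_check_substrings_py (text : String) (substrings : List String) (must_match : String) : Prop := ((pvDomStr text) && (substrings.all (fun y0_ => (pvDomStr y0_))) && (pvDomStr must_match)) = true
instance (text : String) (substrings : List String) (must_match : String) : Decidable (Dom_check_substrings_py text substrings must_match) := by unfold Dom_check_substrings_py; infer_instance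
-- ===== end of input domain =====

-- B scans the once-lowered text, collecting every window of each distinct substring length into a
-- set, so each substring becomes one set lookup and the verdict is derived from the misses alone.
-- ===== PORT A =====
def check_substrings_py (text : String) (substrings : List String) (must_match : String) : Bool × List String :=
  let hits := substrings.filter (fun s => PySem.Str.isIn (PySem.Str.lower s) (PySem.Str.lower text))
  let passed := if must_match = "all" then decide (hits.length = substrings.length) else decide (hits.length > 0)
  let misses := substrings.filter (fun s => ! PySem.Str.isIn (PySem.Str.lower s) (PySem.Str.lower text))
  (passed, misses)

-- ===== PORT B =====
-- port of Source B's window collection: for each distinct length m, add every window t[i:i+m] to the set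
def pvWindows (t : List Char) (lengths : PySem.Set Nat) : PySem.Set (List Char) :=
  lengths.foldl (fun w m =>
    (List.range (t.length + 1 - m)).foldl (fun w i => PySem.Set.add w ((t.drop i).take m)) w)
    PySem.Set.empty

def check_substrings_py_alt (text : String) (substrings : List String) (must_match : String) : Bool × List String :=
  let t := (PySem.Str.lower text).toList
  let lengths : PySem.Set Nat := PySem.Set.ofList (substrings.map (fun s => s.length))
  let windows := pvWindows t lengths
  let misses := substrings.filter (fun s => ! PySem.Set.contains windows (PySem.Str.lower s).toList)
  let passed := if must_match = "all" then decide (misses = []) else decide (misses.length < substrings.length)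
  (passed, misses)

-- ===== PRECONDITION & SPEC =====
def Spec_check_substrings_py (text : String) (substrings : List String) (must_match : String) (out : Bool × List String) : Prop := out = check_substrings_py_alt text substrings must_match
instance (text : String) (substrings : List String) (must_match : String) (out : Bool × List String) : Decidable (Spec_check_substrings_py text substrings must_match out) := by unfold Spec_check_substrings_py; infer_instance

-- ===== CLAIM (what is proved, stated in full; the proofs are below) =====
def Claim_equal_check_substrings_py : Prop := ∀ (text : String) (substrings : List String) (must_match : String), Dom_check_substrings_py text substrings must_match → Spec_check_substrings_py text substrings must_match (check_substrings_py text substrings must_match)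

-- ===== LEMMAS AND PROOFS =====

-- a filter and its negation split the list's length
lemma pv_filter_split {α : Type} (q : α → Bool) (l : List α) :
    (l.filter q).length + (l.filter (fun x => ! q x)).length = l.length := by
  induction l with
  | nil => rfl
  | cons x xs ih =>
    by_cases hx : q x = true <;>
      simp only [List.filter_cons, hx, Bool.not_true, Bool.not_false, Bool.false_eq_true,
        ite_true, ite_false, List.length_cons] <;> omega

-- membership in the window set: exactly the windows t[i:i+m] for the collected lengths m
lemma pv_mem_windows (t : List Char) (ls : List Nat) (w0 : PySem.Set (List Char)) (y : List Char) :
    y ∈ ls.foldl (fun w m =>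
      (List.range (t.length + 1 - m)).foldl (fun w i => PySem.Set.add w ((t.drop i).take m)) w) w0
    ↔ y ∈ w0 ∨ ∃ m ∈ ls, ∃ i, i < t.length + 1 - m ∧ y = (t.drop i).take m := by
  induction ls generalizing w0 with
  | nil => simp
  | cons m ms ih =>
    rw [List.foldl_cons, ih, PySem.Set.mem_foldl_add]
    simp only [List.mem_range, List.mem_cons]
    constructor
    · rintro (⟨hy | ⟨i, hi, hw⟩⟩ | ⟨m', hm', i, hi, hw⟩)
      · exact Or.inl hy
      · exact Or.inr ⟨m, Or.inl rfl, i, hi, hw⟩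
      · exact Or.inr ⟨m', Or.inr hm', i, hi, hw⟩
    · rintro (hy | ⟨m', hm' | hm', i, hi, hw⟩)
      · exact Or.inl (Or.inl hy)
      · subst hm'; exact Or.inl (Or.inr ⟨i, hi, hw⟩)
      · exact Or.inr ⟨m', hm', i, hi, hw⟩

-- a window of collected length equals p exactly when p occurs in t
lemma pv_exists_window_iff_isIn (t p : List Char) :
    (∃ i, i < t.length + 1 - p.length ∧ p = (t.drop i).take p.length)
    ↔ PySem.Chars.isIn p t = true := by
  constructor
  · rintro ⟨i, hi, hw⟩
    have hpre : p <+: t.drop i := by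
      rw [List.prefix_iff_eq_take, ← hw]
    exact (PySem.Chars.exists_prefix_drop_iff_isIn p t).mp ⟨i, hpre⟩
  · intro h
    obtain ⟨j, hpre⟩ := (PySem.Chars.exists_prefix_drop_iff_isIn p t).mpr h
    have hlen := hpre.length_le
    simp only [List.length_drop] at hlen
    by_cases hj : j ≤ t.length
    · exact ⟨j, by omega, List.prefix_iff_eq_take.mp hpre⟩
    · have hp0 : p.length = 0 := by omega
      rw [List.length_eq_zero_iff] at hp0
      exact ⟨0, by simp [hp0], by simp [hp0]⟩

-- for a substring of the list, the set lookup equals Python's `s.lower() in text.lower()`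
lemma pvPred_eq (text : String) (substrings : List String) (s : String) (hs : s ∈ substrings) :
    PySem.Str.isIn (PySem.Str.lower s) (PySem.Str.lower text) =
    PySem.Set.contains (pvWindows (PySem.Str.lower text).toList
      (PySem.Set.ofList (substrings.map (fun s => s.length)))) (PySem.Str.lower s).toList := by
  set t := (PySem.Str.lower text).toList
  set p := (PySem.Str.lower s).toList with hp
  have hplen : p.length = s.length := by
    rw [hp, PySem.Str.toList_lower, PySem.Chars.lower]
    simp
  have hmem : p.length ∈ PySem.Set.ofList (substrings.map (fun s => s.length)) := by
    rw [PySem.Set.mem_ofList, List.mem_map]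
    exact ⟨s, hs, hplen.symm⟩
  rw [PySem.Str.isIn_eq, Bool.eq_iff_iff, PySem.Set.contains_iff]
  unfold pvWindows
  rw [pv_mem_windows]
  constructor
  · intro h
    obtain ⟨i, hi, hw⟩ := (pv_exists_window_iff_isIn t p).mpr h
    exact Or.inr ⟨p.length, hmem, i, hi, hw⟩
  · rintro (hy | ⟨m, _, i, hi, hw⟩)
    · simp [PySem.Set.empty] at hy
    · have hm : m ≤ t.length := by omega
      have hplen' : p.length = m := by
        rw [hw]
        simp only [List.length_take, List.length_drop]
        omega
      refine (pv_exists_window_iff_isIn t p).mp ⟨i, ?_, ?_⟩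
      · omega
      · rw [hplen']; exact hw
-- ===== VERDICT (by name: the statement is the Claim_ definition above) =====
theorem check_substrings_py_spec : Claim_equal_check_substrings_py := by
  intro text substrings must_match hdom
  clear hdom
  unfold Spec_check_substrings_py check_substrings_py check_substrings_py_alt
  have hA : substrings.filter (fun s => PySem.Str.isIn (PySem.Str.lower s) (PySem.Str.lower text))
      = substrings.filter (fun s => PySem.Set.contains (pvWindows (PySem.Str.lower text).toList
          (PySem.Set.ofList (substrings.map (fun s => s.length)))) (PySem.Str.lower s).toList) :=
    List.filter_congr (fun s hs => pvPred_eq text substrings s hs)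
  have hB : substrings.filter (fun s => ! PySem.Str.isIn (PySem.Str.lower s) (PySem.Str.lower text))
      = substrings.filter (fun s => ! PySem.Set.contains (pvWindows (PySem.Str.lower text).toList
          (PySem.Set.ofList (substrings.map (fun s => s.length)))) (PySem.Str.lower s).toList) :=
    List.filter_congr (fun s hs => by rw [pvPred_eq text substrings s hs])
  simp only [hA, hB]
  refine Prod.ext ?_ rfl
  simp only
  have hsum := pv_filter_split (fun s => PySem.Set.contains (pvWindows (PySem.Str.lower text).toList
          (PySem.Set.ofList (substrings.map (fun s => s.length)))) (PySem.Str.lower s).toList) substrings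
  by_cases hmm : must_match = "all"
  · rw [if_pos hmm, if_pos hmm, decide_eq_decide, ← List.countP_eq_length_filter,
      List.countP_eq_length, List.filter_eq_nil_iff]
    simp
  · rw [if_neg hmm, if_neg hmm, decide_eq_decide]
    omega
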